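-- pv_equiv track=rewrite | github.com/111922-bat/traffic-emergency-response-gcn-lstm | services/congestion_analyzer.py | _build_simplified_network
-- ===== SOURCE A (Python) =====
-- from typing import Dict, List, Tuple, Optional, Union, Any, Set
--
-- def _build_simplified_network(current_data: Dict[str, Any]) -> Dict[str, List[str]]:
--     """构建简化的网络连接"""
--     segments = list(current_data.keys())
--     connections = {}
--
--     # 假设线性连接
--     for i, segment in enumerate(segments):
--         neighbors = []
--         if i > 0:
--             neighbors.append(segments[i-1])
--         if i < len(segments) - 1:
--             neighbors.append(segments[i+1])
--         connections[segment] = neighbors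
--
--     return connections
-- ===== SOURCE B (Python) =====
-- def _build_simplified_network(current_data):
--     """Edge-centric construction: start every key with an empty list, then walk the
--     chain's consecutive-pair edges in two staged passes, appending each edge's
--     backward neighbor first and its forward neighbor second."""
--     segments = list(current_data.keys())
--     connections = {seg: [] for seg in segments}
--     edges = list(zip(segments, segments[1:]))
--     for a, b in edges:          # pass 1: b's backward neighbor is a
--         connections[b].append(a)
--     for a, b in edges:          # pass 2: a's forward neighbor is b
--         connections[a].append(b)
--     return connections
-- ===== Notes on version B (the rewrite author's own statement) =====
-- stated objective: alternative
-- what changed: B is edge-centric instead of node-centric: it pre-seeds every key with an empty list and then accumulates neighbors by iterating over consecutive-pair edges in two staged passes (all backward neighbors, then all forward neighbors), replacing A's per-node indexed loop with i-1/i+1 lookups.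
import Mathlib
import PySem

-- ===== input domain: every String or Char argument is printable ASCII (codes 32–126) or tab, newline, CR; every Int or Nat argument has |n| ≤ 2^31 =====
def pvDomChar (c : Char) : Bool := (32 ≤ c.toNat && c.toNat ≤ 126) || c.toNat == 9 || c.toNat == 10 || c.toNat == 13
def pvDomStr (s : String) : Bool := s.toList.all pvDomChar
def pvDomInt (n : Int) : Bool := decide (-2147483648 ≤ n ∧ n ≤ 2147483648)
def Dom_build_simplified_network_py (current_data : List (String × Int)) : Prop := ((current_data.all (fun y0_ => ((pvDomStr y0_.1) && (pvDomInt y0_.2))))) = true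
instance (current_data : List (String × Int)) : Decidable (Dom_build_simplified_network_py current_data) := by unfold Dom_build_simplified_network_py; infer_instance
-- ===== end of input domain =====

-- B replaces A's node-centric indexed loop (i-1/i+1 lookups) with an edge-centric construction:
-- seed every key with [], then accumulate neighbors over consecutive-pair edges in two staged
-- passes (backward neighbors, then forward); return values proved identical (objective: alternative).

-- ===== PORT A =====
def build_simplified_network_py (current_data : List (String × Int)) : List (String × List String) :=
  let segments := (PySem.Dict.ofList current_data).keys
  let connections : PySem.Dict String (List String) :=
    (PySem.List.enumerate segments).foldl
      (fun d p =>
        let i : Int := p.1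
        let neighbors : List String :=
          (if i > 0 then [PySem.List.pyGetD segments (i - 1) ""] else []) ++
          (if i < (segments.length : Int) - 1 then [PySem.List.pyGetD segments (i + 1) ""] else [])
        d.insert p.2 neighbors)
      PySem.Dict.empty
  connections.items

-- ===== PORT B =====
def build_simplified_network_py_alt (current_data : List (String × Int)) : List (String × List String) :=
  let segments := (PySem.Dict.ofList current_data).keys
  let init : PySem.Dict String (List String) :=
    segments.foldl (fun d s => d.insert s ([] : List String)) PySem.Dict.empty
  let edges := segments.zip (PySem.List.slice segments (some 1) none)
  let d1 := edges.foldl (fun d p => d.modify p.2 [] (fun l => l ++ [p.1])) init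
  let d2 := edges.foldl (fun d p => d.modify p.1 [] (fun l => l ++ [p.2])) d1
  d2.items

-- ===== PRECONDITION & SPEC =====
def Spec_build_simplified_network_py (current_data : List (String × Int)) (out : List (String × List String)) : Prop := out = build_simplified_network_py_alt current_data
instance (current_data : List (String × Int)) (out : List (String × List String)) : Decidable (Spec_build_simplified_network_py current_data out) := by unfold Spec_build_simplified_network_py; infer_instance

-- ===== CLAIM (what is proved, stated in full; the proofs are below) =====
def Claim_equal_build_simplified_network_py : Prop := ∀ (current_data : List (String × Int)), Dom_build_simplified_network_py current_data → Spec_build_simplified_network_py current_data (build_simplified_network_py current_data)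

-- ===== LEMMAS AND PROOFS =====

-- consecutive-pair edges of a nodup list, filtered by first component
theorem pv_filter_fst (l : List String) (hnd : l.Nodup) (i : Nat) (hi : i < l.length) :
    (l.zip l.tail).filter (fun p => p.1 == l[i]) =
      if h : i + 1 < l.length then [(l[i], l[i+1]'h)] else [] := by
  induction l generalizing i with
  | nil => simp at hi
  | cons a t ih =>
    cases t with
    | nil =>
      have h0 : i = 0 := by simpa using hi
      subst h0
      simp
    | cons b t' =>
      have hat : a ∉ (b :: t') := (List.nodup_cons.mp hnd).1
      have hndt : (b :: t').Nodup := (List.nodup_cons.mp hnd).2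
      simp only [List.tail_cons] at ih
      cases i with
      | zero =>
        have hrest : ((b :: t').zip t').filter (fun p => p.1 == a) = [] := by
          rw [List.filter_eq_nil_iff]
          intro p hp
          have := (List.of_mem_zip hp).1
          simp only [beq_iff_eq]
          intro h; exact hat (h ▸ this)
        simp only [List.zip_cons_cons, List.tail_cons, List.filter_cons]
        simp only [List.getElem_cons_zero, BEq.rfl, if_true, hrest]
        simp
      | succ j =>
        have hj : j < (b :: t').length := by simpa using hi
        have hne : a ≠ (b :: t')[j] := fun h => hat (h ▸ List.getElem_mem hj)
        simp only [List.zip_cons_cons, List.tail_cons, List.filter_cons,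
          List.getElem_cons_succ]
        rw [if_neg (by simpa using hne)]
        rw [ih hndt j hj]
        by_cases h : j + 1 < (b :: t').length
        · rw [dif_pos h, dif_pos (by simpa using Nat.succ_lt_succ h)]
          simp
        · rw [dif_neg h, dif_neg (by simp at h ⊢; omega)]

-- consecutive-pair edges of a nodup list, filtered by second component
theorem pv_filter_snd (l : List String) (hnd : l.Nodup) (i : Nat) (hi : i < l.length) :
    (l.zip l.tail).filter (fun p => p.2 == l[i]) =
      if h : 0 < i then [(l[i-1]'(by omega), l[i])] else [] := by
  induction l generalizing i with
  | nil => simp at hi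
  | cons a t ih =>
    cases t with
    | nil =>
      have h0 : i = 0 := by simpa using hi
      subst h0
      simp
    | cons b t' =>
      have hat : a ∉ (b :: t') := (List.nodup_cons.mp hnd).1
      have hndt : (b :: t').Nodup := (List.nodup_cons.mp hnd).2
      simp only [List.tail_cons] at ih
      cases i with
      | zero =>
        have hrest : ((b :: t').zip t').filter (fun p => p.2 == a) = [] := by
          rw [List.filter_eq_nil_iff]
          intro p hp
          have h2 := (List.of_mem_zip hp).2
          have h2' : p.2 ∈ (b :: t') := List.mem_of_mem_tail (by simpa using h2)
          simp only [beq_iff_eq]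
          intro h; exact hat (h ▸ h2')
        simp only [List.zip_cons_cons, List.tail_cons, List.filter_cons]
        have hba : ¬ (b == a) = true := by
          simp only [beq_iff_eq]
          intro h; exact hat (h ▸ List.mem_cons_self)
        simp only [List.getElem_cons_zero]
        rw [if_neg hba, hrest]
        simp
      | succ j =>
        have hj : j < (b :: t').length := by simpa using hi
        simp only [List.zip_cons_cons, List.tail_cons, List.filter_cons, List.getElem_cons_succ]
        rw [ih hndt j hj]
        cases j with
        | zero =>
          simp
        | succ j' =>
          have hne : ¬ (b == (b :: t')[j'+1]) = true := by
            simp only [beq_iff_eq]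
            intro h
            have h0 : (b :: t')[0] = (b :: t')[j'+1] := by simpa using h
            have := (List.Nodup.getElem_inj_iff hndt).mp h0
            omega
          rw [if_neg hne, dif_pos (by omega), dif_pos (by omega)]
          simp

theorem pv_set_update_subset (s xs : List String) (h : ∀ x ∈ xs, x ∈ s) :
    PySem.Set.update s xs = s := by
  rw [PySem.Set.update_eq_append_filter]
  have hnil : ((PySem.Set.ofList xs).filter (fun y => !(PySem.Set.contains s y))) = [] := by
    rw [List.filter_eq_nil_iff]
    intro y hy
    have hyx : y ∈ xs := (PySem.Set.mem_ofList _ _).mp hy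
    simp [PySem.Set.contains, h y hyx]
  rw [hnil, List.append_nil]

theorem pv_map_eq (segs : List String) (hnd : segs.Nodup) :
    (PySem.List.enumerate segs 0).map
      (fun p => (p.2,
        (if p.1 > 0 then [PySem.List.pyGetD segs (p.1 - 1) ""] else []) ++
        (if p.1 < (segs.length : Int) - 1 then [PySem.List.pyGetD segs (p.1 + 1) ""] else [])))
    = segs.map (fun k => (k,
        ((segs.zip segs.tail).filter (fun p => p.2 == k)).map (fun p => p.1) ++
        ((segs.zip segs.tail).filter (fun p => p.1 == k)).map (fun p => p.2))) := by
  apply List.ext_getElem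
  · simp [PySem.List.length_enumerate]
  · intro k h1 h2
    have hk : k < segs.length := by
      simpa [PySem.List.length_enumerate] using h1
    simp only [List.getElem_map, PySem.List.getElem_enumerate]
    refine Prod.ext rfl ?_
    simp only [zero_add]
    rw [pv_filter_snd segs hnd k hk, pv_filter_fst segs hnd k hk]
    cases k with
    | zero =>
      rw [dif_neg (by omega : ¬ (0:Nat) < 0)]
      push_cast
      by_cases h : (0:Nat) + 1 < segs.length
      · rw [dif_pos h, if_pos (by push_cast; omega : ((0:Int) < (segs.length:Int) - 1))]
        rw [PySem.List.pyGetD_ofNat' segs 1 "",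
          List.getD_eq_getElem _ _ (by omega : 1 < segs.length)]
        simp
      · rw [dif_neg h, if_neg (by push_cast at h ⊢; omega)]
        simp
    | succ j =>
      rw [dif_pos (by omega : 0 < j + 1)]
      push_cast
      rw [if_pos (by omega : ((j:Int) + 1 > 0))]
      rw [show ((j:Int) + 1 - 1) = ((j : Nat) : Int) by omega, PySem.List.pyGetD_natCast,
        List.getD_eq_getElem _ _ (by omega : j < segs.length)]
      by_cases h : j + 1 + 1 < segs.length
      · rw [dif_pos h, if_pos (by push_cast; omega : ((j:Int) + 1 < (segs.length:Int) - 1))]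
        rw [show ((j:Int) + 1 + 1) = (((j + 2) : Nat) : Int) by push_cast; omega,
          PySem.List.pyGetD_natCast,
          List.getD_eq_getElem _ _ (by omega : j + 2 < segs.length)]
        simp
      · rw [dif_neg h, if_neg (by push_cast at h ⊢; omega)]
        simp

theorem pv_main (current_data : List (String × Int)) :
    build_simplified_network_py current_data = build_simplified_network_py_alt current_data := by
  simp only [build_simplified_network_py, build_simplified_network_py_alt]
  rw [PySem.List.slice_from_one]
  have hnd : ((PySem.Dict.ofList current_data).keys).Nodup :=
    PySem.Dict.nodup_keys_ofList current_data
  set segs := (PySem.Dict.ofList current_data).keys with hs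
  -- A side
  rw [PySem.Dict.items_foldl_insert_fresh (PySem.List.enumerate segs) Prod.snd _
    PySem.Dict.empty (by simp) (by rw [PySem.List.map_snd_enumerate]; exact hnd)]
  -- B side: the initial dict maps each segment to []
  have hinit : (segs.foldl (fun d s => d.insert s ([] : List String)) PySem.Dict.empty).items
      = segs.map (fun s => (s, ([] : List String))) := by
    have := PySem.Dict.items_foldl_insert_fresh segs (fun s => s)
      (fun _ => ([] : List String)) PySem.Dict.empty (by simp) (by simpa using hnd)
    simpa using this
  have hkinit : (segs.foldl (fun d s => d.insert s ([] : List String)) PySem.Dict.empty).keys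
      = segs := by
    show (segs.foldl (fun d s => d.insert s ([] : List String)) PySem.Dict.empty).items.map
      (fun p => p.1) = segs
    rw [hinit, List.map_map,
      show ((fun p => (p : String × List String).1) ∘ (fun s => (s, ([] : List String)))) = id
        from rfl, List.map_id]
  have hedge_fst : ∀ x ∈ (segs.zip segs.tail).map (fun p => (p : String × String).1), x ∈ segs := by
    intro x hx
    obtain ⟨p, hp, hpe⟩ := List.mem_map.mp hx
    exact hpe ▸ (List.of_mem_zip hp).1
  have hedge_snd : ∀ x ∈ (segs.zip segs.tail).map (fun p => (p : String × String).2), x ∈ segs := by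
    intro x hx
    obtain ⟨p, hp, hpe⟩ := List.mem_map.mp hx
    exact hpe ▸ List.mem_of_mem_tail (List.of_mem_zip hp).2
  -- loop 1 is the swapped grouping loop
  have hswap : (segs.zip segs.tail).foldl (fun d p => d.modify p.2 [] (fun l => l ++ [p.1]))
        (segs.foldl (fun d s => d.insert s ([] : List String)) PySem.Dict.empty)
      = ((segs.zip segs.tail).map Prod.swap).foldl
          (fun d p => d.modify p.1 [] (fun l => l ++ [p.2]))
          (segs.foldl (fun d s => d.insert s ([] : List String)) PySem.Dict.empty) := by
    rw [List.foldl_map]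
    rfl
  have hk1 : ((segs.zip segs.tail).foldl (fun d p => d.modify p.2 [] (fun l => l ++ [p.1]))
        (segs.foldl (fun d s => d.insert s ([] : List String)) PySem.Dict.empty)).keys = segs := by
    rw [hswap, PySem.Dict.keys_foldl_modify_key, hkinit, List.map_map]
    apply pv_set_update_subset
    intro x hx
    apply hedge_snd
    obtain ⟨p, hp, hpe⟩ := List.mem_map.mp hx
    exact List.mem_map.mpr ⟨p, hp, hpe⟩
  have hk2 : ((segs.zip segs.tail).foldl (fun d p => d.modify p.1 [] (fun l => l ++ [p.2]))
        ((segs.zip segs.tail).foldl (fun d p => d.modify p.2 [] (fun l => l ++ [p.1]))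
          (segs.foldl (fun d s => d.insert s ([] : List String)) PySem.Dict.empty))).keys
      = segs := by
    rw [PySem.Dict.keys_foldl_modify_key, hk1]
    exact pv_set_update_subset _ _ hedge_fst
  have hgd : ∀ k ∈ segs,
      ((segs.zip segs.tail).foldl (fun d p => d.modify p.1 [] (fun l => l ++ [p.2]))
        ((segs.zip segs.tail).foldl (fun d p => d.modify p.2 [] (fun l => l ++ [p.1]))
          (segs.foldl (fun d s => d.insert s ([] : List String)) PySem.Dict.empty))).getD k []
      = ((segs.zip segs.tail).filter (fun p => p.2 == k)).map (fun p => p.1) ++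
        ((segs.zip segs.tail).filter (fun p => p.1 == k)).map (fun p => p.2) := by
    intro k hkm
    rw [PySem.Dict.getD_foldl_modify_append, hswap, PySem.Dict.getD_foldl_modify_append]
    have hginit : (segs.foldl (fun d s => d.insert s ([] : List String))
        PySem.Dict.empty).getD k [] = [] := by
      apply PySem.Dict.getD_of_mem_items
      · rw [hinit]
        exact List.mem_map.mpr ⟨k, hkm, rfl⟩
      · rw [hkinit]; exact hnd
    rw [hginit, List.nil_append, List.filter_map, List.map_map]
    rfl
  -- assemble
  have hitems2 := PySem.Dict.items_eq_map_keys
    ((segs.zip segs.tail).foldl (fun d p => d.modify p.1 [] (fun l => l ++ [p.2]))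
      ((segs.zip segs.tail).foldl (fun d p => d.modify p.2 [] (fun l => l ++ [p.1]))
        (segs.foldl (fun d s => d.insert s ([] : List String)) PySem.Dict.empty)))
    (by rw [hk2]; exact hnd) ([] : List String)
  rw [show (PySem.Dict.empty : PySem.Dict String (List String)).items = [] from rfl,
    List.nil_append, hitems2, hk2]
  exact (pv_map_eq segs hnd).trans (List.map_congr_left (fun k hkm => by rw [hgd k hkm]))

-- ===== VERDICT (by name: the statement is the Claim_ definition above) =====
theorem build_simplified_network_py_spec : Claim_equal_build_simplified_network_py := by
  intro cd _
  unfold Spec_build_simplified_network_py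
  exact pv_main cd
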